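-- pv_equiv track=rewrite | github.com/havrail/ContractsAI-stable | src_python/pipeline.py | _map_choice
-- ===== SOURCE A (Python) =====
-- def _map_choice(value, options, default="Other"):
--     if not value: return default
--     val = str(value).lower().strip()
--     for opt in options:
--         if val == opt.lower(): return opt
--     for opt in options:
--         if opt.lower() in val: return opt
--     return default
-- ===== SOURCE B (Python) =====
-- def _map_choice(value, options, default="Other"):
--     if not value:
--         return default
--     val = str(value).lower().strip()
--     first_sub = None
--     for opt in options:
--         lo = opt.lower()
--         if val == lo:
--             return opt
--         if first_sub is None and lo in val:
--             first_sub = opt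
--     return first_sub if first_sub is not None else default
-- ===== Notes on version B (the rewrite author's own statement) =====
-- stated objective: simpler
-- what changed: Two sequential scans (exact match, then substring match) are replaced by one scan that returns an exact match immediately and remembers the first substring candidate for the end.
import Mathlib
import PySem

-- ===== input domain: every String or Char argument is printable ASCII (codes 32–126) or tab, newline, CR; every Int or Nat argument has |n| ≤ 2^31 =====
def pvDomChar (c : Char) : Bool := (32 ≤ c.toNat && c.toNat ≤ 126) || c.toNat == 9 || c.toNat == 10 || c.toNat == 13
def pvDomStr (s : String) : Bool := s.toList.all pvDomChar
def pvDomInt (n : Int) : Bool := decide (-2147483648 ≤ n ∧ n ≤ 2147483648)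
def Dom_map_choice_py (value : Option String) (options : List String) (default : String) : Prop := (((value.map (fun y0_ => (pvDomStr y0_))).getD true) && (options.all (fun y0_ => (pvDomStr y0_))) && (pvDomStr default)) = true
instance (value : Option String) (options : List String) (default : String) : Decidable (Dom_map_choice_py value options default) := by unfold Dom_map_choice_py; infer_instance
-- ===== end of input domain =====

-- B changes A's two sequential scans over `options` into one scan that remembers the
-- first substring candidate (objective: simpler, one pass). Return values are identical.

-- ===== PORT A =====
-- first loop of A: first option whose lowercase equals val
def mapChoiceExact (val : String) : List String → Option String
  | [] => none
  | opt :: rest =>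
    if val == PySem.Str.lower opt then some opt else mapChoiceExact val rest

-- second loop of A: first option whose lowercase is a substring of val
def mapChoiceSub (val : String) : List String → Option String
  | [] => none
  | opt :: rest =>
    if PySem.Str.isIn (PySem.Str.lower opt) val then some opt else mapChoiceSub val rest

def map_choice_py (value : Option String) (options : List String) (default : String) : String :=
  match value with
  | none => default
  | some v =>
    if v == "" then default  -- `if not value`
    else
      let val := PySem.Str.strip (PySem.Str.lower v)
      match mapChoiceExact val options with
      | some opt => opt
      | none =>
        match mapChoiceSub val options with
        | some opt => opt
        | none => default

-- ===== PORT B =====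
-- B's single loop: return on exact match, remember first substring candidate
def mapChoiceLoop (val : String) (firstSub : Option String) (default : String) : List String → String
  | [] => match firstSub with | some s => s | none => default
  | opt :: rest =>
    let lo := PySem.Str.lower opt
    if val == lo then opt
    else
      mapChoiceLoop val
        (if firstSub.isNone && PySem.Str.isIn lo val then some opt else firstSub)
        default rest

def map_choice_py_alt (value : Option String) (options : List String) (default : String) : String :=
  match value with
  | none => default
  | some v =>
    if v == "" then default
    else
      let val := PySem.Str.strip (PySem.Str.lower v)
      mapChoiceLoop val none default options

-- ===== PRECONDITION & SPEC =====
def Spec_map_choice_py (value : Option String) (options : List String) (default : String) (out : String) : Prop := out = map_choice_py_alt value options default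
instance (value : Option String) (options : List String) (default : String) (out : String) : Decidable (Spec_map_choice_py value options default out) := by unfold Spec_map_choice_py; infer_instance

-- ===== CLAIM (what is proved, stated in full; the proofs are below) =====
def Claim_equal_map_choice_py : Prop := ∀ (value : Option String) (options : List String) (default : String), Dom_map_choice_py value options default → Spec_map_choice_py value options default (map_choice_py value options default)

-- ===== LEMMAS AND PROOFS =====

-- B's one-pass loop equals: exact match first, else the remembered candidate, else A's substring scan.
theorem mapChoiceLoop_eq (val default : String) (opts : List String) :
    ∀ firstSub : Option String,
      mapChoiceLoop val firstSub default opts =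
        match mapChoiceExact val opts with
        | some o => o
        | none =>
          match firstSub.or (mapChoiceSub val opts) with
          | some o => o
          | none => default := by
  induction opts with
  | nil => intro fs; cases fs <;> simp [mapChoiceLoop, mapChoiceExact, mapChoiceSub, Option.or]
  | cons opt rest ih =>
    intro fs
    simp only [mapChoiceLoop, mapChoiceExact, mapChoiceSub]
    by_cases hex : val == PySem.Str.lower opt
    · simp [hex]
    · simp only [hex, ih]
      cases fs with
      | some x => simp [Option.or]
      | none =>
        by_cases hsub : PySem.Chars.isIn (PySem.Chars.lower opt.toList) val.toList = true
        · simp [hsub, Option.or]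
        · simp [hsub, Option.or]

-- ===== VERDICT (by name: the statement is the Claim_ definition above) =====
theorem map_choice_py_spec : Claim_equal_map_choice_py := by
  intro value options default _
  unfold Spec_map_choice_py map_choice_py map_choice_py_alt
  cases value with
  | none => rfl
  | some v =>
    by_cases hv : v == ""
    · simp [hv]
    · simp only [hv, mapChoiceLoop_eq]
      cases mapChoiceExact (PySem.Str.strip (PySem.Str.lower v)) options with
      | some o => rfl
      | none =>
        cases mapChoiceSub (PySem.Str.strip (PySem.Str.lower v)) options <;> simp [Option.or]
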